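-- pv_equiv track=rewrite | github.com/Recurse-AI/voice-clone-backend | video_processor/transcription.py | _is_same_language
-- ===== SOURCE A (Python) =====
-- def _is_same_language(detected: str, target: str) -> bool:
--     """Check if detected and target languages are the same"""
--     # Normalize language codes
--     detected_norm = detected.lower().strip()
--     target_norm = target.lower().strip()
--
--     # Direct match
--     if detected_norm == target_norm:
--         return True
--
--     # Fish Speech supported languages with common variations
--     language_mapping = {
--         "english": ["en", "eng", "english"],
--         "chinese": ["zh", "chi", "chinese", "mandarin", "zh-cn", "zh-tw"],
--         "japanese": ["ja", "jpn", "japanese"],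
--         "german": ["de", "deu", "german", "deutsch"],
--         "french": ["fr", "fra", "french", "français"],
--         "spanish": ["es", "spa", "spanish", "español"],
--         "korean": ["ko", "kor", "korean", "한국어"],
--         "arabic": ["ar", "ara", "arabic", "العربية"],
--         "russian": ["ru", "rus", "russian", "русский"],
--         "dutch": ["nl", "nld", "dutch", "nederlands"],
--         "italian": ["it", "ita", "italian", "italiano"],
--         "polish": ["pl", "pol", "polish", "polski"],
--         "portuguese": ["pt", "por", "portuguese", "português"],
--         # Common but not Fish Speech supported
--         "hindi": ["hi", "hin", "hindi", "हिन्दी"],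
--         "bengali": ["bn", "ben", "bengali", "bangla", "বাংলা"]
--     }
--
--     for lang_group in language_mapping.values():
--         if detected_norm in lang_group and target_norm in lang_group:
--             return True
--
--     return False
-- ===== SOURCE B (Python) =====
-- # Flat lookup table built once: each code variant -> integer group id.
-- # Two codes name the same language iff they carry the same group id.
-- _GROUP = {
--     "en": 0, "eng": 0, "english": 0,
--     "zh": 1, "chi": 1, "chinese": 1, "mandarin": 1, "zh-cn": 1, "zh-tw": 1,
--     "ja": 2, "jpn": 2, "japanese": 2,
--     "de": 3, "deu": 3, "german": 3, "deutsch": 3,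
--     "fr": 4, "fra": 4, "french": 4, "français": 4,
--     "es": 5, "spa": 5, "spanish": 5, "español": 5,
--     "ko": 6, "kor": 6, "korean": 6, "한국어": 6,
--     "ar": 7, "ara": 7, "arabic": 7, "العربية": 7,
--     "ru": 8, "rus": 8, "russian": 8, "русский": 8,
--     "nl": 9, "nld": 9, "dutch": 9, "nederlands": 9,
--     "it": 10, "ita": 10, "italian": 10, "italiano": 10,
--     "pl": 11, "pol": 11, "polish": 11, "polski": 11,
--     "pt": 12, "por": 12, "portuguese": 12, "português": 12,
--     "hi": 13, "hin": 13, "hindi": 13, "हिन्दी": 13,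
--     "bn": 14, "ben": 14, "bengali": 14, "bangla": 14, "বাংলা": 14,
-- }
--
--
-- def _is_same_language(detected: str, target: str) -> bool:
--     """Check if detected and target languages are the same"""
--     d = detected.lower().strip()
--     t = target.lower().strip()
--     if d == t:
--         return True
--     gd = _GROUP.get(d, -1)
--     return gd >= 0 and gd == _GROUP.get(t, -1)
-- ===== Notes on version B (the rewrite author's own statement) =====
-- stated objective: idiomatic
-- what changed: Replaces the per-call scan over the nested language groups with a single flat literal dict mapping each code variant to an integer group id; after the direct-match check the two ids are looked up once and compared.
import Mathlib
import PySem

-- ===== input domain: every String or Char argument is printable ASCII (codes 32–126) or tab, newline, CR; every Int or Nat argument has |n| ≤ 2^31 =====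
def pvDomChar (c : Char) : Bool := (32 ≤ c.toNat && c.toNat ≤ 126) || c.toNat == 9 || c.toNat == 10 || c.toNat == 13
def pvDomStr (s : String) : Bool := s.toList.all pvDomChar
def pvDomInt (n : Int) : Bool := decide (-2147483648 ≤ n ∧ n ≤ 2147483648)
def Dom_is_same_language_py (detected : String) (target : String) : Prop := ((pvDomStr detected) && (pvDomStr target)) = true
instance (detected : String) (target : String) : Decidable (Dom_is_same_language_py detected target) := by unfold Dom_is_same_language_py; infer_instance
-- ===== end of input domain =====

-- B drops A's per-call loop over nested language groups: one flat literal dict maps each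
-- code variant to an integer group id, and the two ids are looked up and compared (idiomatic).

-- ===== PORT A =====
-- the language_mapping dict literal of A (insertion order preserved)
def pvLangMappingA : List (String × List String) := [
  ("english", ["en", "eng", "english"]),
  ("chinese", ["zh", "chi", "chinese", "mandarin", "zh-cn", "zh-tw"]),
  ("japanese", ["ja", "jpn", "japanese"]),
  ("german", ["de", "deu", "german", "deutsch"]),
  ("french", ["fr", "fra", "french", "français"]),
  ("spanish", ["es", "spa", "spanish", "español"]),
  ("korean", ["ko", "kor", "korean", "한국어"]),
  ("arabic", ["ar", "ara", "arabic", "العربية"]),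
  ("russian", ["ru", "rus", "russian", "русский"]),
  ("dutch", ["nl", "nld", "dutch", "nederlands"]),
  ("italian", ["it", "ita", "italian", "italiano"]),
  ("polish", ["pl", "pol", "polish", "polski"]),
  ("portuguese", ["pt", "por", "portuguese", "português"]),
  ("hindi", ["hi", "hin", "hindi", "हिन्दी"]),
  ("bengali", ["bn", "ben", "bengali", "bangla", "বাংলা"])]

-- the 'for lang_group in language_mapping.values(): if … return True' loop with its early return
def pvLoopA (dn tn : String) : List (List String) → Bool
  | [] => false
  | g :: rest => if g.contains dn && g.contains tn then true else pvLoopA dn tn rest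

def is_same_language_py (detected : String) (target : String) : Bool :=
  let detected_norm := PySem.Str.strip (PySem.Str.lower detected)
  let target_norm := PySem.Str.strip (PySem.Str.lower target)
  if detected_norm == target_norm then true
  else pvLoopA detected_norm target_norm (pvLangMappingA.map Prod.snd)

-- ===== PORT B =====
-- Source B's _GROUP dict literal: code variant -> integer group id (all keys distinct)
def pvGroup : PySem.Dict String Int := PySem.Dict.mk [
  ("en", 0), ("eng", 0), ("english", 0),
  ("zh", 1), ("chi", 1), ("chinese", 1), ("mandarin", 1), ("zh-cn", 1), ("zh-tw", 1),
  ("ja", 2), ("jpn", 2), ("japanese", 2),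
  ("de", 3), ("deu", 3), ("german", 3), ("deutsch", 3),
  ("fr", 4), ("fra", 4), ("french", 4), ("français", 4),
  ("es", 5), ("spa", 5), ("spanish", 5), ("español", 5),
  ("ko", 6), ("kor", 6), ("korean", 6), ("한국어", 6),
  ("ar", 7), ("ara", 7), ("arabic", 7), ("العربية", 7),
  ("ru", 8), ("rus", 8), ("russian", 8), ("русский", 8),
  ("nl", 9), ("nld", 9), ("dutch", 9), ("nederlands", 9),
  ("it", 10), ("ita", 10), ("italian", 10), ("italiano", 10),
  ("pl", 11), ("pol", 11), ("polish", 11), ("polski", 11),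
  ("pt", 12), ("por", 12), ("portuguese", 12), ("português", 12),
  ("hi", 13), ("hin", 13), ("hindi", 13), ("हिन्दी", 13),
  ("bn", 14), ("ben", 14), ("bengali", 14), ("bangla", 14), ("বাংলা", 14)]

def is_same_language_py_alt (detected : String) (target : String) : Bool :=
  let d := PySem.Str.strip (PySem.Str.lower detected)
  let t := PySem.Str.strip (PySem.Str.lower target)
  if d == t then true
  else
    let gd := PySem.Dict.getD pvGroup d (-1)
    decide (gd ≥ 0) && (gd == PySem.Dict.getD pvGroup t (-1))

-- ===== PRECONDITION & SPEC =====
def Spec_is_same_language_py (detected : String) (target : String) (out : Bool) : Prop := out = is_same_language_py_alt detected target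
instance (detected : String) (target : String) (out : Bool) : Decidable (Spec_is_same_language_py detected target out) := by unfold Spec_is_same_language_py; infer_instance

-- ===== CLAIM (what is proved, stated in full; the proofs are below) =====
def Claim_equal_is_same_language_py : Prop := ∀ (detected : String) (target : String), Dom_is_same_language_py detected target → Spec_is_same_language_py detected target (is_same_language_py detected target)

-- ===== LEMMAS AND PROOFS =====

-- proof-side: groups numbered from a start index i, flattened to (code, id) pairs
def pvFlatIdx (i : Int) : List (List String) → List (String × Int)
  | [] => []
  | g :: rest => g.map (fun c => (c, i)) ++ pvFlatIdx (i + 1) rest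

-- first-match association lookup mirroring Dict.get? on a literal dict
def pvAssoc (x : String) : List (String × Int) → Option Int
  | [] => none
  | (k, v) :: rest => if k == x then some v else pvAssoc x rest

lemma pv_get?_mk (l : List (String × Int)) (x : String) :
    PySem.Dict.get? (PySem.Dict.mk l) x = pvAssoc x l := by
  induction l with
  | nil => simp [pvAssoc, PySem.Dict.get?]
  | cons p rest ih => rw [← p.eta]; rw [PySem.Dict.get?_mk_cons]; simp [pvAssoc, ih]

lemma pv_assoc_append (x : String) (l₁ l₂ : List (String × Int)) :
    pvAssoc x (l₁ ++ l₂) = (pvAssoc x l₁).or (pvAssoc x l₂) := by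
  induction l₁ with
  | nil => simp [pvAssoc]
  | cons p rest ih => rw [← p.eta]; simp only [List.cons_append, pvAssoc, ih]; split <;> simp

lemma pv_assoc_map_const (g : List String) (i : Int) (x : String) :
    pvAssoc x (g.map (fun c => (c, i))) = if g.contains x then some i else none := by
  induction g with
  | nil => simp [pvAssoc]
  | cons c rest ih =>
    by_cases h : c = x
    · simp [pvAssoc, h]
    · have hb : (c == x) = false := beq_eq_false_iff_ne.mpr h
      simp [pvAssoc, hb, ih, Ne.symm h]

lemma pv_assoc_flatIdx_ge (i : Int) (gs : List (List String)) (x : String) (v : Int)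
    (h : pvAssoc x (pvFlatIdx i gs) = some v) : i ≤ v := by
  induction gs generalizing i with
  | nil => simp [pvFlatIdx, pvAssoc] at h
  | cons g rest ih =>
    rw [pvFlatIdx, pv_assoc_append, pv_assoc_map_const] at h
    by_cases hc : g.contains x = true
    · rw [hc, if_pos rfl] at h; simp at h; omega
    · rw [Bool.not_eq_true] at hc; rw [hc] at h; simp at h
      have := ih (i + 1) h; omega

-- the loop returns false when one of the codes is in no group
lemma pv_loop_no_left (dn tn : String) (gs : List (List String))
    (h : ∀ g ∈ gs, dn ∉ g) : pvLoopA dn tn gs = false := by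
  induction gs with
  | nil => rfl
  | cons g rest ih =>
    have hc : g.contains dn = false := by simpa using h g (List.mem_cons_self ..)
    simp only [pvLoopA, hc, Bool.false_and, Bool.false_eq_true, if_false]
    exact ih (fun g' hg => h g' (List.mem_cons_of_mem _ hg))

lemma pv_loop_no_right (dn tn : String) (gs : List (List String))
    (h : ∀ g ∈ gs, tn ∉ g) : pvLoopA dn tn gs = false := by
  induction gs with
  | nil => rfl
  | cons g rest ih =>
    have hc : g.contains tn = false := by simpa using h g (List.mem_cons_self ..)
    simp only [pvLoopA, hc, Bool.and_false, Bool.false_eq_true, if_false]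
    exact ih (fun g' hg => h g' (List.mem_cons_of_mem _ hg))

-- the loop over disjoint groups computes exactly "both codes found, with the same id"
lemma pv_loop_eq_ids (i : Int) (gs : List (List String)) (dn tn : String)
    (hnd : (gs.flatMap id).Nodup) :
    pvLoopA dn tn gs =
      (match pvAssoc dn (pvFlatIdx i gs), pvAssoc tn (pvFlatIdx i gs) with
       | some v, some w => v == w
       | _, _ => false) := by
  induction gs generalizing i with
  | nil => rfl
  | cons g rest ih =>
    rw [List.flatMap_cons, List.nodup_append] at hnd
    obtain ⟨-, hrest, hdisj⟩ := hnd
    rw [pvFlatIdx, pv_assoc_append, pv_assoc_append, pv_assoc_map_const, pv_assoc_map_const]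
    by_cases hd : g.contains dn = true
    · rw [hd, if_pos rfl]
      have hdn : ∀ g' ∈ rest, dn ∉ g' := by
        intro g' hg' hm
        exact hdisj dn (by simpa using hd) dn (List.mem_flatMap.2 ⟨g', hg', hm⟩) rfl
      by_cases ht : g.contains tn = true
      · rw [ht, if_pos rfl]
        simp only [pvLoopA, beq_self_eq_true, Option.some_or]
        simp only [hd, ht, Bool.and_self, if_true]
      · rw [Bool.not_eq_true] at ht; rw [ht]
        simp only [pvLoopA, hd, ht, Bool.and_false, Bool.false_eq_true, if_false,
          Option.some_or, Option.none_or]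
        rw [pv_loop_no_left dn tn rest hdn]
        cases hw : pvAssoc tn (pvFlatIdx (i + 1) rest) with
        | none => rfl
        | some w =>
          have hge := pv_assoc_flatIdx_ge (i + 1) rest tn w hw
          have hne : (i == w) = false := beq_eq_false_iff_ne.mpr (by omega)
          simp [hne]
    · rw [Bool.not_eq_true] at hd; rw [hd]
      simp only [Bool.false_eq_true, if_false, Option.none_or]
      by_cases ht : g.contains tn = true
      · rw [ht, if_pos rfl]
        have htn : ∀ g' ∈ rest, tn ∉ g' := by
          intro g' hg' hm
          exact hdisj tn (by simpa using ht) tn (List.mem_flatMap.2 ⟨g', hg', hm⟩) rfl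
        simp only [pvLoopA, hd, Bool.false_and, Bool.false_eq_true, if_false, Option.some_or]
        rw [pv_loop_no_right dn tn rest htn]
        cases hv : pvAssoc dn (pvFlatIdx (i + 1) rest) with
        | none => rfl
        | some v =>
          have hge := pv_assoc_flatIdx_ge (i + 1) rest dn v hv
          have hne : (v == i) = false := beq_eq_false_iff_ne.mpr (by omega)
          simp [hne]
      · rw [Bool.not_eq_true] at ht; rw [ht]
        simp only [Bool.false_eq_true, if_false, Option.none_or]
        have hstep : pvLoopA dn tn (g :: rest) = pvLoopA dn tn rest := by
          simp only [pvLoopA, hd, Bool.false_and, Bool.false_eq_true, if_false]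
        rw [hstep, ih (i + 1) hrest]

-- the codes of A's mapping are pairwise distinct across (and within) groups
lemma pv_codes_nodup : ((pvLangMappingA.map Prod.snd).flatMap id).Nodup := by
  decide

-- B's literal dict is exactly A's groups flattened with ids 0,1,2,…
lemma pv_group_eq : pvGroup = PySem.Dict.mk (pvFlatIdx 0 (pvLangMappingA.map Prod.snd)) := by
  decide

lemma pv_flatIdx_ids_nonneg (i : Int) (hi : 0 ≤ i) (gs : List (List String)) (x : String)
    (v : Int) (h : pvAssoc x (pvFlatIdx i gs) = some v) : 0 ≤ v := by
  have := pv_assoc_flatIdx_ge i gs x v h; omega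

-- ===== VERDICT (by name: the statement is the Claim_ definition above) =====
set_option maxHeartbeats 1000000 in
theorem is_same_language_py_spec : Claim_equal_is_same_language_py := by
  intro detected target _
  unfold Spec_is_same_language_py
  show is_same_language_py detected target = is_same_language_py_alt detected target
  simp only [is_same_language_py, is_same_language_py_alt]
  by_cases h : PySem.Str.strip (PySem.Str.lower detected) = PySem.Str.strip (PySem.Str.lower target)
  · simp [h]
  · have hb : (PySem.Str.strip (PySem.Str.lower detected) == PySem.Str.strip (PySem.Str.lower target)) = false :=
      beq_eq_false_iff_ne.mpr h
    rw [hb]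
    simp only [Bool.false_eq_true, if_false]
    set dn := PySem.Str.strip (PySem.Str.lower detected)
    set tn := PySem.Str.strip (PySem.Str.lower target)
    rw [pv_loop_eq_ids 0 (pvLangMappingA.map Prod.snd) dn tn pv_codes_nodup]
    rw [pv_group_eq]
    rw [PySem.Dict.getD_eq_get?_getD, PySem.Dict.getD_eq_get?_getD, pv_get?_mk, pv_get?_mk]
    cases hv : pvAssoc dn (pvFlatIdx 0 (pvLangMappingA.map Prod.snd)) with
    | none => simp
    | some v =>
      have hv0 : 0 ≤ v := pv_flatIdx_ids_nonneg 0 le_rfl _ dn v hv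
      cases hw : pvAssoc tn (pvFlatIdx 0 (pvLangMappingA.map Prod.snd)) with
      | none =>
        have hne : (v == (-1 : Int)) = false := beq_eq_false_iff_ne.mpr (by omega)
        simp [hv0, hne]
      | some w => simp [hv0]
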